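-- pv_equiv track=rewrite | github.com/fabio-reale/aoc-solutions | 2015/python/day_11b_hack.py | non_overlapping_pairs
-- ===== SOURCE A (Python) =====
-- def non_overlapping_pairs(pwd: str) -> bool:
--     found = False
--     i = len(pwd)
--     while i >= 2:
--         fst, snd = pwd[i - 2 : i]
--         i -= 1
--         if fst == snd:
--             if not found:
--                 found = True
--                 i -= 1
--             else:
--                 return True
--
--     return False
-- ===== SOURCE B (Python) =====
-- def non_overlapping_pairs(pwd: str) -> bool:
--     # Run-length scan: a run of k equal chars contributes k // 2 non-overlapping pairs.
--     total = 0
--     run = 0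
--     prev = None
--     for ch in pwd:
--         if ch == prev:
--             run += 1
--         else:
--             total += run // 2
--             run = 1
--             prev = ch
--     total += run // 2
--     return total >= 2
-- ===== Notes on version B (the rewrite author's own statement) =====
-- stated objective: alternative
-- what changed: Replaces A's backward index-jumping greedy scan with flag and early return by a single forward run-length pass that sums run//2 over maximal runs of equal characters and compares the total with 2.
import Mathlib
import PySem

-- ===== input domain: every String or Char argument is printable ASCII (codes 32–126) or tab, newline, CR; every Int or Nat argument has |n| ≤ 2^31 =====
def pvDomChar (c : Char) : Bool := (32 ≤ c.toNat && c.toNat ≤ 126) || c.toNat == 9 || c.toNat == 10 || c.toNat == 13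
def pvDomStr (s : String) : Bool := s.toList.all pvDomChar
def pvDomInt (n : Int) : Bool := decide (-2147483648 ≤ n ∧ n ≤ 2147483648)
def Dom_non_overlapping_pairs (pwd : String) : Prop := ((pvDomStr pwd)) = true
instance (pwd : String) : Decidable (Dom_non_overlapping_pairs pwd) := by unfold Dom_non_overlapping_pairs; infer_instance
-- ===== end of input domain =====

-- B replaces A's backward two-step greedy scan (flag + early return) by a single forward
-- run-length pass summing run//2 per run of equal characters (objective: alternative).

-- ===== PORT A =====
-- literal port of A's while-loop: index i runs down from len(pwd); pwd[i-2:i] is sliced,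
-- a matching pair sets the flag and skips an extra position, a second match returns True.
def pvALoop (s : List Char) (found : Bool) (i : Nat) : Bool :=
  if _h : 2 ≤ i then
    match PySem.List.slice s (some ((i : Int) - 2)) (some (i : Int)) with
    | [fst, snd] =>
      -- Python's 'i -= 1' before the test is folded into the recursive calls
      if fst == snd then
        if !found then pvALoop s true (i - 2)
        else true
      else pvALoop s found (i - 1)
    | _ => false   -- unreachable when i ≤ s.length (Python's unpack would raise otherwise)
  else false
termination_by i
decreasing_by all_goals omega

def non_overlapping_pairs (pwd : String) : Bool :=
  pvALoop pwd.toList false pwd.toList.length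

-- ===== PORT B =====
-- state of Source B's loop: (total, run, prev)
def pvBStep (st : Nat × Nat × Option Char) (ch : Char) : Nat × Nat × Option Char :=
  if some ch == st.2.2 then (st.1, st.2.1 + 1, st.2.2)
  else (st.1 + st.2.1 / 2, 1, some ch)

def non_overlapping_pairs_alt (pwd : String) : Bool :=
  let st := pwd.toList.foldl pvBStep (0, 0, none)
  decide (2 ≤ st.1 + st.2.1 / 2)

-- ===== PRECONDITION & SPEC =====
def Spec_non_overlapping_pairs (pwd : String) (out : Bool) : Prop := out = non_overlapping_pairs_alt pwd
instance (pwd : String) (out : Bool) : Decidable (Spec_non_overlapping_pairs pwd out) := by unfold Spec_non_overlapping_pairs; infer_instance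

-- ===== CLAIM (what is proved, stated in full; the proofs are below) =====
def Claim_equal_non_overlapping_pairs : Prop := ∀ (pwd : String), Dom_non_overlapping_pairs pwd → Spec_non_overlapping_pairs pwd (non_overlapping_pairs pwd)

-- ===== LEMMAS AND PROOFS =====

-- greedy left-to-right count of non-overlapping adjacent equal pairs
def gPairs : List Char → Nat
  | [] => 0
  | [_] => 0
  | a :: b :: t => if a == b then 1 + gPairs t else gPairs (b :: t)

-- length of the leading run of character c
def leadRun (c : Char) : List Char → Nat
  | [] => 0
  | d :: t => if d == c then 1 + leadRun c t else 0

-- length of the trailing run of p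
def trailRun (p : List Char) : Nat :=
  match p.getLast? with
  | none => 0
  | some c => leadRun c p.reverse

lemma leadRun_le_length (c : Char) (l : List Char) : leadRun c l ≤ l.length := by
  induction l with
  | nil => simp [leadRun]
  | cons d t ih => simp only [leadRun, List.length_cons]; split <;> omega

lemma leadRun_eq_length_mem {c : Char} {l : List Char} (h : leadRun c l = l.length) :
    ∀ x ∈ l, x = c := by
  induction l with
  | nil => simp
  | cons d t ih =>
    simp only [leadRun, List.length_cons] at h
    by_cases hd : d = c
    · simp only [hd, beq_self_eq_true, if_true] at h
      intro x hx
      rcases List.mem_cons.mp hx with hx | hx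
      · exact hx.trans hd
      · exact ih (by omega) x hx
    · simp only [beq_iff_eq, hd, if_false] at h
      omega

lemma leadRun_append_singleton (c a : Char) (s : List Char) :
    leadRun c (s ++ [a]) =
      leadRun c s + (if leadRun c s = s.length ∧ a = c then 1 else 0) := by
  induction s with
  | nil => simp [leadRun]
  | cons d t ih =>
    simp only [List.cons_append, leadRun, List.length_cons]
    by_cases hd : d = c
    · simp only [hd, beq_self_eq_true, if_true, ih]
      have hiff : (1 + leadRun c t = t.length + 1 ∧ a = c) ↔ (leadRun c t = t.length ∧ a = c) := by
        constructor <;> rintro ⟨h1, h2⟩ <;> exact ⟨by omega, h2⟩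
      rw [if_congr hiff rfl rfl]
      omega
    · simp only [beq_iff_eq, hd, if_false]
      split_ifs <;> simp_all

lemma leadRun_concat_ne (c a : Char) (s : List Char)
    (h : a = c → leadRun c s ≠ s.length) : leadRun c (s ++ [a]) = leadRun c s := by
  rw [leadRun_append_singleton]
  split_ifs with hc
  · exact absurd hc.1 (h hc.2)
  · omega

lemma leadRun_pair_parity (c b : Char) (s : List Char) :
    leadRun c ((s ++ [b]) ++ [b]) % 2 = leadRun c s % 2 := by
  have hle := leadRun_le_length c s
  rw [leadRun_append_singleton, leadRun_append_singleton]
  by_cases hb : b = c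
  · by_cases hall : leadRun c s = s.length
    · rw [if_pos ⟨hall, hb⟩, if_pos ⟨by simp [hall], hb⟩]
      omega
    · rw [if_neg (fun h => hall h.1), if_neg (fun h => by
        simp only [List.length_append, List.length_cons, List.length_nil] at h
        omega)]
      omega
  · rw [if_neg (fun h => hb h.2), if_neg (fun h => hb h.2)]
    omega

lemma gPairs_cons (c : Char) (t : List Char) :
    gPairs (c :: t) = gPairs t + leadRun c t % 2 := by
  induction t generalizing c with
  | nil => simp [gPairs, leadRun]
  | cons d t' ih =>
    by_cases h : c = d
    · subst h
      simp only [gPairs, leadRun, beq_self_eq_true, if_true, ih c]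
      omega
    · simp [gPairs, leadRun, h, Ne.symm h]

lemma gPairs_append_singleton (l : List Char) (c : Char) :
    gPairs (l ++ [c]) = gPairs l + leadRun c l.reverse % 2 := by
  induction l using gPairs.induct with
  | case1 => simp [gPairs, leadRun]
  | case2 a => by_cases h : a = c <;> simp [gPairs, leadRun, h]
  | case3 a b t hab ih =>
    have hab' : a = b := by simpa using hab
    subst hab'
    simp only [List.cons_append, gPairs, beq_self_eq_true, if_true, ih,
      List.reverse_cons]
    rw [leadRun_pair_parity]
    omega
  | case4 a b t hab ih =>
    have hab' : ¬ a = b := by simpa using hab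
    simp only [List.cons_append, gPairs, hab, Bool.false_eq_true, if_false,
      List.reverse_cons]
    rw [leadRun_concat_ne c a (t.reverse ++ [b]) (fun hac heq => by
      have hb : b = c := leadRun_eq_length_mem heq b (by simp)
      exact hab' (hac.trans hb.symm))]
    simpa [List.reverse_cons] using ih

lemma gPairs_reverse (l : List Char) : gPairs l.reverse = gPairs l := by
  induction l with
  | nil => rfl
  | cons c t ih =>
    rw [List.reverse_cons, gPairs_append_singleton, List.reverse_reverse, ih, gPairs_cons]

lemma leadRun_reverse_eq_zero (ch : Char) (p : List Char) (h : p.getLast? ≠ some ch) :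
    leadRun ch p.reverse = 0 := by
  cases hp : p.reverse with
  | nil => simp [leadRun]
  | cons d r =>
    have hd : p.getLast? = some d := by
      rw [← List.head?_reverse, hp]; rfl
    have hne : d ≠ ch := fun he => h (he ▸ hd)
    simp [leadRun, hne]

lemma trailRun_append (p : List Char) (c : Char) :
    trailRun (p ++ [c]) = if p.getLast? = some c then trailRun p + 1 else 1 := by
  unfold trailRun
  rw [List.getLast?_concat, List.reverse_append]
  simp only [List.reverse_cons, List.reverse_nil, List.nil_append, List.cons_append,
    List.nil_append]
  show (if c == c then 1 + leadRun c p.reverse else 0) = _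
  simp only [beq_self_eq_true, if_true]
  split_ifs with h
  · rw [h]
    show 1 + leadRun c p.reverse = leadRun c p.reverse + 1
    omega
  · rw [leadRun_reverse_eq_zero c p h]

lemma fold_inv (t : List Char) :
    ∀ (p : List Char) (total run : Nat) (prev : Option Char),
      total + run / 2 = gPairs p → run = trailRun p → prev = p.getLast? →
      (List.foldl pvBStep (total, run, prev) t).1 +
        (List.foldl pvBStep (total, run, prev) t).2.1 / 2 = gPairs (p ++ t) := by
  induction t with
  | nil =>
    intro p total run prev h1 _ _
    simpa using h1
  | cons ch t' ih =>
    intro p total run prev h1 h2 h3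
    simp only [List.foldl_cons, pvBStep]
    by_cases hc : prev = some ch
    · have hcb : (some ch == prev) = true := by simp [hc]
      rw [hcb, if_pos rfl]
      have hlast : p.getLast? = some ch := h3 ▸ hc
      have hlead : leadRun ch p.reverse = run := by
        rw [h2]; unfold trailRun; rw [hlast]
      have hg : gPairs (p ++ [ch]) = gPairs p + run % 2 := by
        rw [gPairs_append_singleton, hlead]
      have := ih (p ++ [ch]) total (run + 1) prev
        (by rw [hg]; omega)
        (by rw [trailRun_append, if_pos hlast, h2])
        (by rw [List.getLast?_concat, h3, hlast])
      simpa [List.append_assoc] using this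
    · have hcb : (some ch == prev) = false := by
        simp only [beq_eq_false_iff_ne, ne_eq]
        exact fun h => hc h.symm
      rw [hcb, if_neg (by simp)]
      have hlast : p.getLast? ≠ some ch := fun h => hc (h3 ▸ h.symm ▸ rfl)
      have hg : gPairs (p ++ [ch]) = gPairs p := by
        rw [gPairs_append_singleton, leadRun_reverse_eq_zero ch p hlast]
        omega
      have := ih (p ++ [ch]) (total + run / 2) 1 (some ch)
        (by rw [hg]; omega)
        (by rw [trailRun_append, if_neg hlast])
        (by rw [List.getLast?_concat])
      simpa [List.append_assoc] using this

lemma gPairs_short {l : List Char} (h : l.length ≤ 1) : gPairs l = 0 := by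
  match l, h with
  | [], _ => rfl
  | [_], _ => rfl

lemma aLoop_eq (s : List Char) :
    ∀ i, i ≤ s.length → ∀ found,
      pvALoop s found i =
        decide (2 ≤ gPairs ((s.take i).reverse) + (if found then 1 else 0)) := by
  intro i
  induction i using Nat.strong_induction_on with
  | _ i ih =>
    intro hi found
    rw [pvALoop]
    by_cases h2 : 2 ≤ i
    · rw [dif_pos h2]
      have hi2 : i - 2 < s.length := by omega
      have hi1 : i - 1 < s.length := by omega
      have hcast2 : (i : Int) - 2 = ((i - 2 : Nat) : Int) := by omega
      have hslice : PySem.List.slice s (some ((i : Int) - 2)) (some (i : Int)) =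
          [s[i - 2], s[i - 1]] := by
        rw [hcast2, PySem.List.slice_natCast,
          List.drop_eq_getElem_cons hi2, show i - 2 + 1 = i - 1 from by omega,
          List.drop_eq_getElem_cons hi1, show i - (i - 2) = 2 from by omega]
        rfl
      rw [hslice]
      change (if (s[i - 2] == s[i - 1]) = true then
          if (!found) = true then pvALoop s true (i - 2) else true
        else pvALoop s found (i - 1)) = _
      have htake1 : s.take i = s.take (i - 1) ++ [s[i - 1]] := by
        have h := List.take_add_one (l := s) (i := i - 1)
        rw [show i - 1 + 1 = i from by omega] at h
        rw [h, List.getElem?_eq_getElem hi1]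
        rfl
      have htake2 : s.take (i - 1) = s.take (i - 2) ++ [s[i - 2]] := by
        have h := List.take_add_one (l := s) (i := i - 2)
        rw [show i - 2 + 1 = i - 1 from by omega] at h
        rw [h, List.getElem?_eq_getElem hi2]
        rfl
      have hrev : (s.take i).reverse = s[i - 1] :: s[i - 2] :: (s.take (i - 2)).reverse := by
        rw [htake1, htake2]
        simp
      by_cases heq : s[i - 2] = s[i - 1]
      · simp only [heq, beq_self_eq_true, if_true]
        have hg : gPairs ((s.take i).reverse) = 1 + gPairs ((s.take (i - 2)).reverse) := by
          rw [hrev]; simp [gPairs, heq]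
        cases found with
        | false =>
          simp only [Bool.not_false, if_true]
          rw [ih (i - 2) (by omega) (by omega) true]
          simp only [hg, Bool.false_eq_true, if_false, if_true, decide_eq_decide]
          omega
        | true =>
          simp only [Bool.not_true, Bool.false_eq_true, if_false, hg, if_true]
          have : (2 ≤ 1 + gPairs ((s.take (i - 2)).reverse) + 1) := by omega
          simp [this]
      · have heqb : (s[i - 2] == s[i - 1]) = false := by simp [heq]
        rw [heqb]
        simp only [Bool.false_eq_true, if_false]
        rw [ih (i - 1) (by omega) (by omega) found]
        have hg : gPairs ((s.take i).reverse) = gPairs ((s.take (i - 1)).reverse) := by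
          rw [hrev, htake2]
          simp only [List.reverse_append, List.reverse_cons, List.reverse_nil,
            List.nil_append, List.cons_append]
          simp [gPairs, Ne.symm heq]
        rw [hg]
    · rw [dif_neg h2]
      have hg : gPairs ((s.take i).reverse) = 0 := by
        apply gPairs_short
        simp only [List.length_reverse, List.length_take]
        omega
      rw [hg]
      cases found <;> simp

-- ===== VERDICT (by name: the statement is the Claim_ definition above) =====
theorem non_overlapping_pairs_spec : Claim_equal_non_overlapping_pairs := by
  intro pwd _
  unfold Spec_non_overlapping_pairs non_overlapping_pairs non_overlapping_pairs_alt
  rw [aLoop_eq pwd.toList pwd.toList.length le_rfl false]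
  have hB := fold_inv pwd.toList [] 0 0 none rfl rfl rfl
  simp only [List.nil_append] at hB
  simp [hB, gPairs_reverse, List.take_of_length_le]
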